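-- pv_equiv track=rewrite | github.com/rsarwas/aoc | 2023-14/answers.py | add_up_rocks
-- ===== SOURCE A (Python) =====
-- MOBILE = "O"
--
-- def add_up_rocks(grid):
--     """Return the total weight of the rocks in the grid.
--     Rocks at the top weigh more; proportional to the size of the grid"""
--     size = len(grid)
--     total = 0
--     for i, row in enumerate(grid):
--         multiplier = size - i  # bottom row = 1, top row = size
--         count = len([x for x in row if x == MOBILE])
--         weight = count * multiplier
--         total += weight
--     return total
-- ===== SOURCE B (Python) =====
-- MOBILE = "O"
--
-- def add_up_rocks(grid):
--     """Single pass with a running prefix count: a rock in row i stays in the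
--     running total for every remaining row, so adding the running total once per
--     row weights it by (size - i) without any position arithmetic."""
--     running = 0
--     total = 0
--     for row in grid:
--         running += sum(1 for x in row if x == MOBILE)
--         total += running
--     return total
-- ===== Notes on version B (the rewrite author's own statement) =====
-- stated objective: alternative
-- what changed: Replaces the enumerate/multiplier weighting (count * (size - i) per row) with a single pass that keeps a running cumulative rock count and adds it to the answer once per row, so no index or size arithmetic is needed.
import Mathlib
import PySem

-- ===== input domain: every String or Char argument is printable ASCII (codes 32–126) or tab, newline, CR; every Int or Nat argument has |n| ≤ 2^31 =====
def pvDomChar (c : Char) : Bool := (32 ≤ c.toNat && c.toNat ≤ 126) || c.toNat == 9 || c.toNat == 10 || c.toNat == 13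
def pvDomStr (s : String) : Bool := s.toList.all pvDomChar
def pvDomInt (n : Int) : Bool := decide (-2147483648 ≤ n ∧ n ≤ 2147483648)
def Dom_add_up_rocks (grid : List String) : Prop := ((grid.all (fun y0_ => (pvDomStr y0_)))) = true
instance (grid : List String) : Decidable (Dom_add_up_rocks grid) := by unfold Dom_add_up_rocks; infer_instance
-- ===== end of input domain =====

-- B replaces A's per-row count*(size-i) weighting with a single pass keeping a
-- running cumulative rock count added to the answer once per row (alternative decomposition).

-- ===== PORT A =====
def add_up_rocks (grid : List String) : Int :=
  let size : Int := (grid.length : Int)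
  (PySem.List.enumerate grid).foldl
    (fun total p =>
      let multiplier := size - p.1
      let count : Int := ((p.2.toList.filter (fun x => x == 'O')).length : Int)
      let weight := count * multiplier
      total + weight) 0

-- ===== PORT B =====
-- sum(1 for x in row if x == MOBILE)
def pvRowCount (row : String) : Int :=
  row.toList.foldl (fun n x => if x == 'O' then n + 1 else n) 0

def add_up_rocks_alt (grid : List String) : Int :=
  (grid.foldl
    (fun (s : Int × Int) row =>
      let running := s.1 + pvRowCount row
      (running, s.2 + running)) (0, 0)).2

-- ===== PRECONDITION & SPEC =====
def Spec_add_up_rocks (grid : List String) (out : Int) : Prop := out = add_up_rocks_alt grid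
instance (grid : List String) (out : Int) : Decidable (Spec_add_up_rocks grid out) := by unfold Spec_add_up_rocks; infer_instance

-- ===== CLAIM (what is proved, stated in full; the proofs are below) =====
def Claim_equal_add_up_rocks : Prop := ∀ (grid : List String), Dom_add_up_rocks grid → Spec_add_up_rocks grid (add_up_rocks grid)

-- ===== LEMMAS AND PROOFS =====

-- A's per-row count equals B's per-row count
theorem pvRowCount_eq_filter (row : String) :
    ((row.toList.filter (fun x => x == 'O')).length : Int) = pvRowCount row := by
  rw [pvRowCount, PySem.List.foldl_beq_add_one]
  simp [List.count_eq_countP, List.countP_eq_length_filter]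

-- weighted sum with decreasing multipliers, starting at n
def pvAW (l : List String) (n : Int) : Int :=
  match l with
  | [] => 0
  | r :: t => pvRowCount r * n + pvAW t (n - 1)

theorem pvA_fold (l : List String) (size s tot : Int) :
    (PySem.List.enumerate l s).foldl
      (fun total p =>
        total + ((p.2.toList.filter (fun x => x == 'O')).length : Int) * (size - p.1)) tot
      = tot + pvAW l (size - s) := by
  induction l generalizing s tot with
  | nil => simp [pvAW, PySem.List.enumerate]
  | cons r t ih =>
      rw [PySem.List.enumerate_cons, List.foldl_cons, ih, pvAW, pvRowCount_eq_filter]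
      ring_nf

theorem pvB_fold (l : List String) (run tot : Int) :
    (l.foldl (fun (s : Int × Int) row =>
        (s.1 + pvRowCount row, s.2 + (s.1 + pvRowCount row))) (run, tot)).2
      = tot + (l.length : Int) * run + pvAW l (l.length : Int) := by
  induction l generalizing run tot with
  | nil => simp [pvAW]
  | cons r t ih =>
      rw [List.foldl_cons, ih, pvAW, List.length_cons]
      push_cast
      have h : ((t.length : Int) + 1) - 1 = (t.length : Int) := by ring
      rw [h]
      ring

-- ===== VERDICT (by name: the statement is the Claim_ definition above) =====
theorem add_up_rocks_spec : Claim_equal_add_up_rocks := by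
  intro grid _
  show add_up_rocks grid = add_up_rocks_alt grid
  rw [add_up_rocks, add_up_rocks_alt]
  simp only []
  rw [pvA_fold grid (grid.length : Int) 0 0, pvB_fold grid 0 0]
  ring_nf
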